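-- pv_equiv track=rewrite | github.com/Jenniemilia/Algoritmi_harjoituksia | bothsame.py | count
-- ===== SOURCE A (Python) =====
-- def count(s):
--     merkkijono = s
--     laskuri = 0
--     kirjaimet = {}
--
--     for i in merkkijono:
--         if i not in kirjaimet:
--             kirjaimet[i] = 0
--         kirjaimet[i] += 1
--         laskuri += kirjaimet[i]
--     return laskuri
-- ===== SOURCE B (Python) =====
-- def count(s):
--     freq = {}
--     for ch in s:
--         freq[ch] = freq.get(ch, 0) + 1
--     return sum(k * (k + 1) // 2 for k in freq.values())
-- ===== Notes on version B (the rewrite author's own statement) =====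
-- stated objective: alternative
-- what changed: Replaces A's single interleaved loop (running per-character counters added into the total at every step) by two separate passes: build the full frequency table once, then reduce the distinct counts with the triangular-number closed form k*(k+1)//2.
import Mathlib
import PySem

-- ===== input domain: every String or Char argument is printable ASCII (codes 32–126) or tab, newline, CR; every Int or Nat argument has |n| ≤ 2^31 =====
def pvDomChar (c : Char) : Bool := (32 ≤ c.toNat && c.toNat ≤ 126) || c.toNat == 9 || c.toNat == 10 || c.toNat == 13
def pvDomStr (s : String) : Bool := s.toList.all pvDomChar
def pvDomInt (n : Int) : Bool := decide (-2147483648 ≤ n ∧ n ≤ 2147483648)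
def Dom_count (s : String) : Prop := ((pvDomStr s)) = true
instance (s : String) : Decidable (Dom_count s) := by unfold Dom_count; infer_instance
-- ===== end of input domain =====

-- B replaces A's single interleaved loop by a count-then-closed-form reduction (alternative; same O(n) cost).

-- ===== PORT A =====
def count (s : String) : Int :=
  (s.toList.foldl
    (fun (st : PySem.Dict Char Int × Int) i =>
      let kirjaimet := st.1
      let kirjaimet := if kirjaimet.contains i = false then kirjaimet.insert i 0 else kirjaimet
      let kirjaimet := kirjaimet.insert i (kirjaimet.getD i 0 + 1)
      (kirjaimet, st.2 + kirjaimet.getD i 0))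
    (PySem.Dict.empty, 0)).2

-- ===== PORT B =====
def count_alt (s : String) : Int :=
  let freq := s.toList.foldl (fun d ch => d.insert ch (d.getD ch 0 + 1)) PySem.Dict.empty
  freq.values.foldl (fun acc k => acc + PySem.Int.floordiv (k * (k + 1)) 2) 0

-- ===== PRECONDITION & SPEC =====
def Spec_count (s : String) (out : Int) : Prop := out = count_alt s
instance (s : String) (out : Int) : Decidable (Spec_count s out) := by unfold Spec_count; infer_instance

-- ===== CLAIM (what is proved, stated in full; the proofs are below) =====
def Claim_equal_count : Prop := ∀ (s : String), Dom_count s → Spec_count s (count s)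

-- ===== LEMMAS AND PROOFS =====

-- triangular closed form used by B
def pvT (k : Int) : Int := PySem.Int.floordiv (k * (k + 1)) 2

-- A's loop with the dict-update branch simplified to a single insert
def pvSfold (l : List Char) (st : PySem.Dict Char Int × Int) : PySem.Dict Char Int × Int :=
  l.foldl (fun st i => (st.1.insert i (st.1.getD i 0 + 1), st.2 + st.1.getD i 0 + 1)) st

-- B's target value: sum of pvT over the counts of the distinct characters
def pvSB (l : List Char) : Int := ((PySem.Set.ofList l).map (fun c => pvT (l.count c : Int))).sum

lemma pvT_succ (n : ℕ) : pvT ((n : Int) + 1) = pvT (n : Int) + ((n : Int) + 1) := by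
  obtain ⟨m, hm⟩ := Nat.even_mul_succ_self n
  have e1 : n * (n + 1) = 2 * m := by omega
  have e2 : (n + 1) * (n + 2) = 2 * (m + n + 1) := by nlinarith [e1]
  unfold pvT
  rw [PySem.Int.floordiv_eq_ediv_of_pos (by norm_num),
      PySem.Int.floordiv_eq_ediv_of_pos (by norm_num)]
  have h1 : ((n : Int)) * ((n : Int) + 1) = 2 * (m : Int) := by exact_mod_cast e1
  have h2 : ((n : Int) + 1) * (((n : Int) + 1) + 1) = 2 * ((m : Int) + (n : Int) + 1) := by
    have := e2; push_cast at this ⊢; linarith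
  rw [h1, h2, Int.mul_ediv_cancel_left _ (by norm_num), Int.mul_ediv_cancel_left _ (by norm_num)]
  ring

-- A's per-step dict update equals a single insert
lemma pvstep_dict (d : PySem.Dict Char Int) (i : Char) :
    (let k := if d.contains i = false then d.insert i 0 else d;
     k.insert i (k.getD i 0 + 1)) = d.insert i (d.getD i 0 + 1) := by
  by_cases h : d.contains i = false
  · simp only [h, if_true]
    have h0 : d.getD i 0 = 0 := by
      rw [PySem.Dict.getD_of_not_contains]; exact h
    rw [PySem.Dict.getD_insert_self, PySem.Dict.insert_insert_self, h0]
  · simp [h]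

-- A's whole loop step, simplified
lemma pvstep_eq (st : PySem.Dict Char Int × Int) (i : Char) :
    (let kirjaimet := st.1
     let kirjaimet := if kirjaimet.contains i = false then kirjaimet.insert i 0 else kirjaimet
     let kirjaimet := kirjaimet.insert i (kirjaimet.getD i 0 + 1)
     ((kirjaimet, st.2 + kirjaimet.getD i 0) : PySem.Dict Char Int × Int)) =
    (st.1.insert i (st.1.getD i 0 + 1), st.2 + st.1.getD i 0 + 1) := by
  have h := pvstep_dict st.1 i
  simp only at h ⊢
  rw [h, PySem.Dict.getD_insert_self, Prod.mk.injEq]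
  exact ⟨rfl, by ring⟩

lemma pvfold_eq (l : List Char) :
    ∀ st : PySem.Dict Char Int × Int,
    l.foldl
      (fun (st : PySem.Dict Char Int × Int) i =>
        let kirjaimet := st.1
        let kirjaimet := if kirjaimet.contains i = false then kirjaimet.insert i 0 else kirjaimet
        let kirjaimet := kirjaimet.insert i (kirjaimet.getD i 0 + 1)
        (kirjaimet, st.2 + kirjaimet.getD i 0)) st = pvSfold l st := by
  induction l with
  | nil => intro st; rfl
  | cons c l ih =>
    intro st
    simp only [List.foldl_cons, pvSfold] at *
    rw [pvstep_eq st c, ih]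

-- the dict component of pvSfold is the plain counting fold
lemma pvSfold_fst (l : List Char) :
    ∀ (d : PySem.Dict Char Int) (a : Int),
    (pvSfold l (d, a)).1 = l.foldl (fun d i => d.insert i (d.getD i 0 + 1)) d := by
  induction l with
  | nil => intro d a; rfl
  | cons c l ih => intro d a; simp only [pvSfold, List.foldl_cons] at *; exact ih _ _

-- sum over a Nodup list when f and g differ only at one member
lemma pvsum_update {S : List Char} (hS : S.Nodup) {x : Char} (hx : x ∈ S)
    (f g : Char → Int) (hfg : ∀ c ∈ S, c ≠ x → g c = f c) :
    (S.map g).sum = (S.map f).sum + (g x - f x) := by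
  induction S with
  | nil => cases hx
  | cons a S ih =>
    rcases List.mem_cons.mp hx with h | h
    · subst h
      have hall : ∀ c ∈ S, g c = f c := by
        intro c hc
        exact hfg c (List.mem_cons_of_mem _ hc) (fun he => (List.nodup_cons.mp hS).1 (he ▸ hc))
      simp only [List.map_cons, List.sum_cons]
      rw [List.map_congr_left hall]
      ring
    · have ha : a ≠ x := fun he => (List.nodup_cons.mp hS).1 (he ▸ h)
      simp only [List.map_cons, List.sum_cons]
      rw [ih (List.nodup_cons.mp hS).2 h (fun c hc => hfg c (List.mem_cons_of_mem _ hc)),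
          hfg a (List.mem_cons_self) ha]
      ring

lemma pvSB_append (l : List Char) (x : Char) :
    pvSB (l ++ [x]) = pvSB l + ((l.count x : Int) + 1) := by
  unfold pvSB
  rw [PySem.Set.ofList_append_singleton, PySem.Set.add_eq_ite]
  have hcount : ∀ c : Char, ((l ++ [x]).count c : Int) =
      (l.count c : Int) + (if c = x then 1 else 0) := by
    intro c
    rw [List.count_append]
    by_cases h : c = x
    · simp [h]
    · have h' : ¬x = c := fun he => h (Eq.symm he)
      simp [h, h']
  by_cases hx : x ∈ PySem.Set.ofList l
  · rw [if_pos hx]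
    have hupd := pvsum_update (PySem.Set.nodup_ofList l) hx
      (fun c => pvT (l.count c : Int)) (fun c => pvT ((l ++ [x]).count c : Int))
      (by intro c _ hc; simp only; rw [hcount c, if_neg hc, add_zero])
    rw [hupd]
    have hk : ((l ++ [x]).count x : Int) = (l.count x : Int) + 1 := by
      rw [hcount x, if_pos rfl]
    simp only [hk, pvT_succ (l.count x)]
    ring
  · rw [if_neg hx]
    have hx' : x ∉ l := fun h => hx ((PySem.Set.mem_ofList _ _).mpr h)
    have hcx : l.count x = 0 := List.count_eq_zero.mpr hx'
    simp only [List.map_append, List.sum_append, List.map_cons, List.map_nil, List.sum_cons,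
      List.sum_nil]
    rw [List.map_congr_left (fun c hc => by
      show pvT ((l ++ [x]).count c : Int) = pvT (l.count c : Int)
      have hne : c ≠ x := fun he => hx (by rw [← he]; exact hc)
      rw [hcount c, if_neg hne, add_zero])]
    have h1 : ((l ++ [x]).count x : Int) = 1 := by
      rw [hcount x, if_pos rfl, hcx]; ring
    rw [h1]
    have hT1 : pvT 1 = 1 := by decide
    rw [hT1, hcx]
    push_cast
    ring

-- the accumulator of A's (simplified) loop from the empty state is pvSB
lemma pvSfold_snd (l : List Char) :
    (pvSfold l (PySem.Dict.empty, 0)).2 = pvSB l := by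
  induction l using List.reverseRecOn with
  | nil => simp [pvSfold, pvSB, PySem.Set.ofList_nil]
  | append_singleton l x ih =>
    unfold pvSfold at *
    rw [List.foldl_append]
    simp only [List.foldl_cons, List.foldl_nil]
    rw [ih, pvSB_append]
    have hd : (l.foldl
        (fun (st : PySem.Dict Char Int × Int) i =>
          (st.1.insert i (st.1.getD i 0 + 1), st.2 + st.1.getD i 0 + 1))
        (PySem.Dict.empty, 0)).1.getD x 0 = (l.count x : Int) := by
      have := pvSfold_fst l PySem.Dict.empty 0
      unfold pvSfold at this
      rw [this, PySem.Dict.getD_foldl_insert_add_one]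
      simp [PySem.Dict.getD_empty]
    rw [hd]
    ring

-- B's value is pvSB
lemma pvcount_alt_eq (s : String) : count_alt s = pvSB s.toList := by
  show (List.foldl (fun acc k => acc + PySem.Int.floordiv (k * (k + 1)) 2) 0
      (s.toList.foldl (fun d ch => d.insert ch (d.getD ch 0 + 1)) PySem.Dict.empty).values)
    = pvSB s.toList
  rw [PySem.Dict.foldl_insert_getD_add_one_eq_counter]
  have hv : (PySem.Dict.counter s.toList).values =
      (PySem.Set.ofList s.toList).map (fun k => (s.toList.count k : Int)) := by
    show ((PySem.Dict.counter s.toList).items.map (·.2)) = _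
    rw [PySem.Dict.items_counter]
    simp [List.map_map, Function.comp]
  rw [hv, PySem.List.foldl_add]
  unfold pvSB pvT
  simp [List.map_map, Function.comp_def]

-- ===== VERDICT (by name: the statement is the Claim_ definition above) =====
theorem count_spec : Claim_equal_count := by
  intro s _
  unfold Spec_count count
  rw [pvfold_eq, pvSfold_snd, pvcount_alt_eq]
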